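-- pv_equiv track=rewrite | github.com/keithhetrick/music-advisor | tools/spotify_enrich_core_corpus.py | _strip_featuring
-- ===== SOURCE A (Python) =====
-- def _strip_featuring(artist: str) -> str:
--     """
--     Strip common "featuring" markers from an artist string to get the
--     primary artist for Spotify search.
--
--     Examples:
--       "Morgan Wallen Featuring ERNEST" -> "Morgan Wallen"
--       "Artist feat. Someone"           -> "Artist"
--       "Artist ft Someone"              -> "Artist"
--
--     We *only* use this for search; we keep the original artist string
--     in the CSV.
--     """
--     s = artist.strip()
--     if not s:
--         return s
--
--     lower = s.lower()
--     cut = len(s)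
--
--     # Order matters only for picking the earliest occurrence
--     markers = [
--         " featuring ",
--         " feat. ",
--         " feat ",
--         " ft. ",
--         " ft ",
--         " with ",
--     ]
--
--     for m in markers:
--         idx = lower.find(m)
--         if idx != -1 and idx < cut:
--             cut = idx
--
--     cleaned = s[:cut].strip()
--     return cleaned or s
-- ===== SOURCE B (Python) =====
-- def _strip_featuring(artist: str) -> str:
--     s = artist.strip()
--     if not s:
--         return s
--
--     markers = (" featuring ", " feat. ", " feat ", " ft. ", " ft ", " with ")
--     low = s.lower()
--
--     # single forward scan: copy characters into `head` until a marker starts here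
--     head = []
--     for i, ch in enumerate(s):
--         if low.startswith(markers, i):
--             break
--         head.append(ch)
--
--     cleaned = "".join(head).strip()
--     return cleaned or s
-- ===== Notes on version B (the rewrite author's own statement) =====
-- stated objective: alternative
-- what changed: A runs six separate substring find passes (one per marker) and takes the minimum index then slices; B makes one forward scan that copies characters into an accumulator and stops at the first position where any marker starts, never computing indices or slicing.
import Mathlib
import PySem

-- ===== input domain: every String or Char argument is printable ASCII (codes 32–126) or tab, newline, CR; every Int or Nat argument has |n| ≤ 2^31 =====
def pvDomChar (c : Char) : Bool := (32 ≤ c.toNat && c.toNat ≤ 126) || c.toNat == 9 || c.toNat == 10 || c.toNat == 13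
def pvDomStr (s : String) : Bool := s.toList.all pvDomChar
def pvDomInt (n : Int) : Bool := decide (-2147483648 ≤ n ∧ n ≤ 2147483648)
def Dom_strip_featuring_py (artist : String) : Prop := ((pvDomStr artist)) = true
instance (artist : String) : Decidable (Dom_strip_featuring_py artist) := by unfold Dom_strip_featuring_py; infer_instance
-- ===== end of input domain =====

-- B replaces A's six separate `find` passes (minimum index, then slice) by one
-- forward scan that copies characters into an accumulator and stops at the first
-- position where any marker starts; objective: alternative single-pass algorithm.

-- ===== PORT A =====
def strip_featuring_py (artist : String) : String :=
  let s := PySem.Str.strip artist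
  if s = "" then s
  else
    let lower := PySem.Str.lower s
    let markers : List String :=
      [" featuring ", " feat. ", " feat ", " ft. ", " ft ", " with "]
    let cut : Int := markers.foldl (fun cut m =>
        let idx := PySem.Str.find lower m
        if idx ≠ -1 ∧ idx < cut then idx else cut) (PySem.Str.len s)
    let cleaned := PySem.Str.strip (PySem.Str.slice s none (some cut))
    if cleaned ≠ "" then cleaned else s

-- ===== PORT B =====
-- `low.startswith(markers, i)` is ported as: some marker is a prefix of low from
-- position i; the loop over `enumerate(s)` that breaks is the structural recursion
-- `pvScanB` walking s's characters while dropping one character of `low` per step.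
def pvScanB (ms : List (List Char)) : List Char → List Char → List Char
  | [], _ => []
  | o :: os, low =>
    if ms.any (fun m => PySem.Chars.startswith low m) then []
    else o :: pvScanB ms os low.tail

def strip_featuring_py_alt (artist : String) : String :=
  let s := PySem.Str.strip artist
  if s = "" then s
  else
    let markers : List (List Char) :=
      [" featuring ".toList, " feat. ".toList, " feat ".toList,
       " ft. ".toList, " ft ".toList, " with ".toList]
    let low := PySem.Str.lower s
    let head := pvScanB markers s.toList low.toList
    let cleaned := PySem.Chars.strip head
    if cleaned ≠ [] then String.ofList cleaned else s

-- ===== PRECONDITION & SPEC =====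
def Spec_strip_featuring_py (artist : String) (out : String) : Prop := out = strip_featuring_py_alt artist
instance (artist : String) (out : String) : Decidable (Spec_strip_featuring_py artist out) := by unfold Spec_strip_featuring_py; infer_instance

-- ===== CLAIM (what is proved, stated in full; the proofs are below) =====
def Claim_equal_strip_featuring_py : Prop := ∀ (artist : String), Dom_strip_featuring_py artist → Spec_strip_featuring_py artist (strip_featuring_py artist)

-- ===== LEMMAS AND PROOFS =====

theorem pv_find?_range_none {p : Nat → Bool} {n : Nat}
    (h : (List.range n).find? p = none) : ∀ j < n, p j = false := by
  intro j hj
  have := List.find?_eq_none.mp h j (List.mem_range.mpr hj)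
  simpa using this

theorem pv_find?_range_some {p : Nat → Bool} {n : Nat} :
    ∀ {i : Nat}, (List.range n).find? p = some i →
    i < n ∧ p i = true ∧ ∀ j < i, p j = false := by
  intro i h
  induction n generalizing i with
  | zero => simp [List.range_zero] at h
  | succ n ih =>
    rw [List.range_succ, List.find?_append] at h
    cases hfn : (List.range n).find? p with
    | some i' =>
      rw [hfn] at h
      simp [Option.or] at h
      rcases ih hfn with ⟨h1, h2, h3⟩
      subst h
      exact ⟨by omega, h2, h3⟩
    | none =>
      rw [hfn] at h
      simp [Option.or] at h
      cases hpn : p n with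
      | false => simp [hpn] at h
      | true =>
        simp [hpn] at h
        subst h
        exact ⟨by omega, hpn, pv_find?_range_none hfn⟩

theorem pv_foldA_char (L : List Char) (ms : List (List Char)) (c : Int) (hc : 0 ≤ c) :
    let r := ms.foldl (fun cut m =>
      let idx := PySem.Chars.find L m
      if idx ≠ -1 ∧ idx < cut then idx else cut) c
    (r = c ∨ ∃ m ∈ ms, 0 ≤ PySem.Chars.find L m ∧ PySem.Chars.find L m = r) ∧
      r ≤ c ∧ (∀ m ∈ ms, 0 ≤ PySem.Chars.find L m → r ≤ PySem.Chars.find L m) ∧ 0 ≤ r := by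
  induction ms generalizing c with
  | nil => exact ⟨Or.inl rfl, le_refl _, by simp, hc⟩
  | cons m ms ih =>
    intro r
    set idx := PySem.Chars.find L m with hidx
    by_cases hcond : idx ≠ -1 ∧ idx < c
    · have h0 : 0 ≤ idx := by
        have := PySem.Chars.neg_one_le_find L m
        rw [← hidx] at this; omega
      have hr : r = ms.foldl (fun cut m =>
          let idx := PySem.Chars.find L m
          if idx ≠ -1 ∧ idx < cut then idx else cut) idx := by
        simp only [r, List.foldl_cons, ← hidx, if_pos hcond]
      rcases ih idx h0 with ⟨ha, hb, hm, hp⟩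
      rw [← hr] at ha hb hm hp
      refine ⟨?_, by omega, ?_, hp⟩
      · rcases ha with h | ⟨m', hm', h1, h2⟩
        · exact Or.inr ⟨m, by simp, h0, by rw [← hidx, h]⟩
        · exact Or.inr ⟨m', by simp [hm'], h1, h2⟩
      · intro m' hm' h'
        rcases List.mem_cons.mp hm' with rfl | hmem
        · rw [← hidx]; omega
        · exact hm m' hmem h'
    · have hr : r = ms.foldl (fun cut m =>
          let idx := PySem.Chars.find L m
          if idx ≠ -1 ∧ idx < cut then idx else cut) c := by
        simp only [r, List.foldl_cons, ← hidx, if_neg hcond]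
      rcases ih c hc with ⟨ha, hb, hm, hp⟩
      rw [← hr] at ha hb hm hp
      refine ⟨?_, hb, ?_, hp⟩
      · rcases ha with h | ⟨m', hm', h1, h2⟩
        · exact Or.inl h
        · exact Or.inr ⟨m', by simp [hm'], h1, h2⟩
      · intro m' hm' h'
        rcases List.mem_cons.mp hm' with rfl | hmem
        · rw [← hidx] at h' ⊢
          have : ¬ idx < c := by
            by_contra hlt
            exact hcond ⟨by omega, hlt⟩
          omega
        · exact hm m' hmem h'

-- A's fold over the six markers picks exactly the first position (in range order)
-- at which some marker starts in the lowered string.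
theorem pv_cut_eq (s : String) :
    ([" featuring ", " feat. ", " feat ", " ft. ", " ft ", " with "] : List String).foldl
      (fun cut m =>
        let idx := PySem.Str.find (PySem.Str.lower s) m
        if idx ≠ -1 ∧ idx < cut then idx else cut) (PySem.Str.len s)
    = (match (List.range (PySem.Str.lower s).toList.length).find?
          (fun i => ([" featuring ", " feat. ", " feat ", " ft. ", " ft ", " with "] : List String).any
            (fun m => PySem.Chars.startswith ((PySem.Str.lower s).toList.drop i) m.toList)) with
       | some i => (i : Int)
       | none => PySem.Str.len s) := by
  set l := (PySem.Str.lower s).toList with hldef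
  set msS : List String := [" featuring ", " feat. ", " feat ", " ft. ", " ft ", " with "] with hms
  set msC : List (List Char) := msS.map String.toList with hmsC
  have hA : msS.foldl
      (fun cut m =>
        let idx := PySem.Str.find (PySem.Str.lower s) m
        if idx ≠ -1 ∧ idx < cut then idx else cut) (PySem.Str.len s)
      = msC.foldl
      (fun cut m =>
        let idx := PySem.Chars.find l m
        if idx ≠ -1 ∧ idx < cut then idx else cut) (PySem.Str.len s) := by
    rw [hmsC, List.foldl_map]
    simp only [PySem.Str.find_eq, hldef]
  rw [hA]
  have hp : ∀ i, msS.any (fun m => PySem.Chars.startswith (l.drop i) m.toList)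
      = msC.any (fun m => PySem.Chars.startswith (l.drop i) m) := by
    intro i; rw [hmsC, List.any_map]; rfl
  have hc : (0:Int) ≤ PySem.Str.len s := by
    rw [PySem.Str.len_eq]; positivity
  have hl : l.length = s.toList.length := by
    rw [hldef, PySem.Str.toList_lower]; simp [PySem.Chars.lower]
  have hne : ∀ m ∈ msC, m ≠ [] := by
    rw [hmsC, hms]; intro m hm; fin_cases hm <;> simp
  obtain ⟨ha, hb, hmins, hr0⟩ := pv_foldA_char l msC (PySem.Str.len s) hc
  cases hfd : (List.range l.length).find?
      (fun i => msS.any (fun m => PySem.Chars.startswith (l.drop i) m.toList)) with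
  | none =>
    have hP : ∀ j < l.length,
        (msS.any (fun m => PySem.Chars.startswith (l.drop j) m.toList)) = false :=
      pv_find?_range_none hfd
    have hnof : ∀ m ∈ msC, ¬ (0 ≤ PySem.Chars.find l m) := by
      intro m hm hpos
      obtain ⟨hpre, _⟩ := PySem.Chars.find_spec hpos
      have htl : (PySem.Chars.find l m).toNat ≤ l.length := by
        have := PySem.Chars.find_le_length l m; omega
      rcases Nat.lt_or_ge (PySem.Chars.find l m).toNat l.length with hlt | hge
      · have hfalse := hP _ hlt
        rw [hp] at hfalse
        have htrue : msC.any (fun m' => PySem.Chars.startswith (l.drop (PySem.Chars.find l m).toNat) m') = true := by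
          apply List.any_eq_true.mpr
          exact ⟨m, hm, (PySem.Chars.startswith_iff _ _).mpr hpre⟩
        rw [htrue] at hfalse
        exact absurd hfalse (by simp)
      · have hdrop : l.drop (PySem.Chars.find l m).toNat = [] :=
          List.drop_eq_nil_of_le (by omega)
        rw [hdrop] at hpre
        exact hne m hm (List.prefix_nil.mp hpre)
    rcases ha with h | ⟨m, hm, h1, _⟩
    · exact h
    · exact absurd h1 (hnof m hm)
  | some i =>
    obtain ⟨hin, hpi, hmin⟩ := pv_find?_range_some hfd
    rw [hp] at hpi
    obtain ⟨m0, hm0, hsw⟩ := List.any_eq_true.mp hpi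
    have hpre0 : m0 <+: l.drop i := (PySem.Chars.startswith_iff _ _).mp hsw
    have h00 : 0 ≤ PySem.Chars.find l m0 := by
      rw [PySem.Chars.find_nonneg_iff]
      rw [← PySem.Chars.isIn_iff_infix]
      exact (PySem.Chars.exists_prefix_drop_iff_isIn m0 l).mp ⟨i, hpre0⟩
    obtain ⟨_, hminf⟩ := PySem.Chars.find_spec h00
    have hfle : (PySem.Chars.find l m0).toNat ≤ i := by
      by_contra hgt
      exact hminf i (by omega) hpre0
    have hrle : msC.foldl (fun cut m =>
        let idx := PySem.Chars.find l m
        if idx ≠ -1 ∧ idx < cut then idx else cut) (PySem.Str.len s) ≤ (i : Int) := by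
      have := hmins m0 hm0 h00
      omega
    have hlen : PySem.Str.len s = (s.toList.length : Int) := PySem.Str.len_eq s
    have hlti : (i : Int) < PySem.Str.len s := by rw [hlen]; exact_mod_cast hl ▸ hin
    suffices hgs : msC.foldl (fun cut m =>
        let idx := PySem.Chars.find l m
        if idx ≠ -1 ∧ idx < cut then idx else cut) (PySem.Str.len s) = (i : Int) by exact hgs
    rcases ha with h | ⟨m, hm, h1, h2⟩
    · rw [h] at hrle ⊢; omega
    · set r := msC.foldl (fun cut m =>
        let idx := PySem.Chars.find l m
        if idx ≠ -1 ∧ idx < cut then idx else cut) (PySem.Str.len s) with hrdef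
      obtain ⟨hprem, _⟩ := PySem.Chars.find_spec h1
      rw [h2] at hprem
      have hPr : msC.any (fun m' => PySem.Chars.startswith (l.drop r.toNat) m') = true :=
        List.any_eq_true.mpr ⟨m, hm, (PySem.Chars.startswith_iff _ _).mpr hprem⟩
      have hige : i ≤ r.toNat := by
        by_contra hlt
        have hflse := hmin r.toNat (by omega)
        rw [hp] at hflse
        rw [hPr] at hflse
        exact absurd hflse (by simp)
      omega

-- B's scan takes exactly the prefix of orig up to the first index at which a
-- marker starts in `low` (or all of orig if none).
theorem pv_scanB_take (ms : List (List Char)) :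
    ∀ (orig low : List Char),
      pvScanB ms orig low
        = orig.take (((List.range orig.length).find?
            (fun i => ms.any (fun m => PySem.Chars.startswith (low.drop i) m))).getD orig.length) := by
  intro orig
  induction orig with
  | nil => intro low; simp [pvScanB]
  | cons o os ih =>
    intro low
    by_cases h0 : ms.any (fun m => PySem.Chars.startswith low m) = true
    · have hf : (List.range (o :: os).length).find?
          (fun i => ms.any (fun m => PySem.Chars.startswith (low.drop i) m)) = some 0 := by
        rw [List.length_cons, List.range_succ_eq_map]
        simp only [List.find?_cons]
        simp [h0]
      rw [hf]
      simp [pvScanB, h0]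
    · have h0' : (ms.any fun m => PySem.Chars.startswith low m) = false := by
        simpa using h0
      have hshift : ∀ i : Nat, low.drop (i + 1) = low.tail.drop i := by
        intro i; rw [← List.drop_one (l := low), List.drop_drop, Nat.add_comm]
      have hf : (List.range (o :: os).length).find?
            (fun i => ms.any (fun m => PySem.Chars.startswith (low.drop i) m))
          = (((List.range os.length).find?
            (fun i => ms.any (fun m => PySem.Chars.startswith (low.tail.drop i) m))).map Nat.succ) := by
        rw [List.length_cons, List.range_succ_eq_map]
        rw [List.find?_cons_of_neg (by simp [h0'])]
        rw [List.find?_map]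
        refine congrArg (Option.map Nat.succ)
          (congrArg (fun p => List.find? p (List.range os.length)) ?_)
        funext i
        simp only [Function.comp_apply, Nat.succ_eq_add_one, hshift i]
      rw [hf]
      simp only [pvScanB, if_neg h0]
      rw [ih low.tail]
      cases hfd : (List.range os.length).find?
          (fun i => ms.any (fun m => PySem.Chars.startswith (low.tail.drop i) m)) with
      | none => simp
      | some j => simp

theorem strip_featuring_py_spec : Claim_equal_strip_featuring_py := by
  intro artist _
  unfold Spec_strip_featuring_py
  simp only [strip_featuring_py, strip_featuring_py_alt]
  by_cases hs : PySem.Str.strip artist = ""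
  · simp [hs]
  · rw [if_neg hs, if_neg hs]
    set s := PySem.Str.strip artist with hsdef
    set msS : List String := [" featuring ", " feat. ", " feat ", " ft. ", " ft ", " with "] with hms
    set msB : List (List Char) := [" featuring ".toList, " feat. ".toList, " feat ".toList,
        " ft. ".toList, " ft ".toList, " with ".toList] with hmsB'
    set l := (PySem.Str.lower s).toList with hldef
    have hl : l.length = s.toList.length := by
      rw [hldef, PySem.Str.toList_lower]; simp [PySem.Chars.lower]
    set cut : Int := msS.foldl (fun cut m =>
        let idx := PySem.Str.find (PySem.Str.lower s) m
        if idx ≠ -1 ∧ idx < cut then idx else cut) (PySem.Str.len s) with hcutdef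
    have hcm : cut = (match (List.range l.length).find?
          (fun i => msS.any (fun m => PySem.Chars.startswith (l.drop i) m.toList)) with
       | some i => (i : Int)
       | none => PySem.Str.len s) := by
      rw [hcutdef, hms, hldef]
      exact pv_cut_eq s
    have hmsB : msB = msS.map String.toList := by rw [hmsB', hms]; rfl
    have hfind_eq : (List.range s.toList.length).find?
          (fun i => msB.any (fun m => PySem.Chars.startswith (l.drop i) m))
        = (List.range l.length).find?
          (fun i => msS.any (fun m => PySem.Chars.startswith (l.drop i) m.toList)) := by
      rw [← hl]
      refine congrArg (fun p => List.find? p (List.range l.length)) ?_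
      funext i
      rw [hmsB, List.any_map]
      rfl
    have hscan := pv_scanB_take msB s.toList l
    -- the sliced-and-stripped A prefix has the same characters as B's stripped head
    have hAlist : (PySem.Str.strip (PySem.Str.slice s none (some cut))).toList
        = PySem.Chars.strip (pvScanB msB s.toList l) := by
      rw [PySem.Str.toList_strip, hscan]
      refine congrArg PySem.Chars.strip ?_
      have hslice : (PySem.Str.slice s none (some cut)).toList
          = PySem.List.slice s.toList none (some cut) := by
        simp [PySem.Str.toList_slice]
      rw [hslice]
      cases hfd : (List.range l.length).find?
          (fun i => msS.any (fun m => PySem.Chars.startswith (l.drop i) m.toList)) with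
      | none =>
        have hcv : cut = PySem.Str.len s := by rw [hcm, hfd]
        have hB0 := hfind_eq.trans hfd
        rw [hcv, PySem.Str.len_eq, PySem.List.slice_to_natCast, hB0]
        simp
      | some i =>
        have hcv : cut = (i : Nat) := by rw [hcm, hfd]
        have hB0 := hfind_eq.trans hfd
        rw [hcv, PySem.List.slice_to_natCast, hB0]
        simp
    set cleanedA := PySem.Str.strip (PySem.Str.slice s none (some cut)) with hcA
    set cleanedB := PySem.Chars.strip (pvScanB msB s.toList l) with hcB
    by_cases hB : cleanedB = ([] : List Char)
    · have hA0 : cleanedA = "" := by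
        have h1 : cleanedA.toList = [] := by rw [hAlist, hB]
        have h2 := congrArg String.ofList h1
        simpa using h2
      rw [if_neg (by simp [hA0]), if_neg (by simp [hB])]
    · have hA0 : cleanedA ≠ "" := by
        intro hcontra
        apply hB
        rw [← hAlist, hcontra]
        rfl
      rw [if_pos (by simpa using hA0), if_pos (by simpa using hB)]
      have h1 : cleanedA.toList = cleanedB := hAlist
      have h2 := congrArg String.ofList h1
      simpa using h2
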